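-- pv_equiv track=rewrite | github.com/imrul18/ThesisWebsite | function.py | chestpaincount
-- ===== SOURCE A (Python) =====
-- def chestpaincount(dataset):
--     count = [0, 0, 0, 0]
--     for x in range(1, len(dataset)):
--         if dataset[x][-1] == 1:
--             if dataset[x][2] == 0:
--                 count[0] += 1
--             elif dataset[x][2] == 1:
--                 count[1] += 1
--             elif dataset[x][2] == 2:
--                 count[2] += 1
--             else:
--                 count[3] += 1
--     return count
-- ===== SOURCE B (Python) =====
-- def chestpaincount(dataset):
--     pos = [row[2] for row in dataset[1:] if row[-1] == 1]
--     c0, c1, c2 = pos.count(0), pos.count(1), pos.count(2)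
--     return [c0, c1, c2, len(pos) - c0 - c1 - c2]
-- ===== Notes on version B (the rewrite author's own statement) =====
-- stated objective: simpler
-- what changed: Replaces A's single indexed loop mutating a 4-slot counter via an if/elif chain by staged passes: first materialise the list of chest-pain values of positive rows, then obtain each explicit bucket with a separate .count scan and the catch-all bucket as len minus the three counts.
import Mathlib
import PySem

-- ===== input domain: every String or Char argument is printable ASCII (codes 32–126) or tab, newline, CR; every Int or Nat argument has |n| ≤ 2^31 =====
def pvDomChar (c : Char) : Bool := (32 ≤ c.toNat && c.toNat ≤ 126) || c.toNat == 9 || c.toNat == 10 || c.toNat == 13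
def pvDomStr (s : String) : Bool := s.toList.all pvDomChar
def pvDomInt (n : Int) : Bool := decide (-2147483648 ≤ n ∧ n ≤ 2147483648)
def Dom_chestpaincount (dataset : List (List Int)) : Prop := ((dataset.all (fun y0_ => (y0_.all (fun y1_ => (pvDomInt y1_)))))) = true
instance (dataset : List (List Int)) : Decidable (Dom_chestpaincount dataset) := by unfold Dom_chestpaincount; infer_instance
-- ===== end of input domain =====

-- B replaces A's single tallying loop by staged passes: collect the chest-pain values of
-- positive rows once, then count each bucket with a separate scan; same cost, simpler shape.

-- ===== PORT A =====
-- count[i] += 1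
def pvIncAt (c : List Int) (i : Nat) : List Int := c.set i (c.getD i 0 + 1)

def chestpaincount (dataset : List (List Int)) : List Int :=
  (PySem.List.pyRange 1 (dataset.length : Int) 1).foldl (fun count x =>
    if PySem.List.pyGetD (PySem.List.pyGetD dataset x []) (-1) 0 = 1 then
      if PySem.List.pyGetD (PySem.List.pyGetD dataset x []) 2 0 = 0 then pvIncAt count 0
      else if PySem.List.pyGetD (PySem.List.pyGetD dataset x []) 2 0 = 1 then pvIncAt count 1
      else if PySem.List.pyGetD (PySem.List.pyGetD dataset x []) 2 0 = 2 then pvIncAt count 2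
      else pvIncAt count 3
    else count) [0, 0, 0, 0]

-- ===== PORT B =====
def chestpaincount_alt (dataset : List (List Int)) : List Int :=
  let pos := ((PySem.List.slice dataset (some 1) none).filter
      (fun row => PySem.List.pyGetD row (-1) 0 == 1)).map
      (fun row => PySem.List.pyGetD row 2 0)
  [(PySem.List.count pos 0 : Int), (PySem.List.count pos 1 : Int), (PySem.List.count pos 2 : Int),
   (pos.length : Int) - PySem.List.count pos 0 - PySem.List.count pos 1 - PySem.List.count pos 2]

-- ===== PRECONDITION & SPEC =====
-- Pre_ excludes exactly the inputs on which A raises IndexError: a row past the header that is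
-- empty (row[-1]), or whose last element is 1 but has fewer than 3 columns (row[2]).
def Pre_chestpaincount (dataset : List (List Int)) : Prop :=
  ∀ row ∈ dataset.drop 1, row ≠ [] ∧ (row.getLastD 0 = 1 → 3 ≤ row.length)
instance (dataset : List (List Int)) : Decidable (Pre_chestpaincount dataset) := by
  unfold Pre_chestpaincount; infer_instance

def pvWitness_chestpaincount : List (List Int) := [[9], [1, 2, 0, 1], [0, 1, 2, 1], [7, 7, 7, 0]]

def Spec_chestpaincount (dataset : List (List Int)) (out : List Int) : Prop := out = chestpaincount_alt dataset
instance (dataset : List (List Int)) (out : List Int) : Decidable (Spec_chestpaincount dataset out) := by unfold Spec_chestpaincount; infer_instance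

-- ===== CLAIM (what is proved, stated in full; the proofs are below) =====
def Claim_equal_chestpaincount : Prop := ∀ (dataset : List (List Int)), Dom_chestpaincount dataset → Pre_chestpaincount dataset → Spec_chestpaincount dataset (chestpaincount dataset)

-- ===== LEMMAS AND PROOFS =====

-- the chest-pain values of positive rows, the list B's counts scan
def pvPos (l : List (List Int)) : List Int :=
  (l.filter (fun row => PySem.List.pyGetD row (-1) 0 == 1)).map
    (fun row => PySem.List.pyGetD row 2 0)

-- A's fold adds, to each slot of the start counter, the corresponding count over pvPos l.
lemma pv_fold_counts (l : List (List Int)) (a b c d : Int) :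
    l.foldl (fun count row =>
      if PySem.List.pyGetD row (-1) 0 = 1 then
        if PySem.List.pyGetD row 2 0 = 0 then pvIncAt count 0
        else if PySem.List.pyGetD row 2 0 = 1 then pvIncAt count 1
        else if PySem.List.pyGetD row 2 0 = 2 then pvIncAt count 2
        else pvIncAt count 3
      else count) [a, b, c, d]
    = [a + ((pvPos l).count 0 : Int), b + ((pvPos l).count 1 : Int),
       c + ((pvPos l).count 2 : Int),
       d + (((pvPos l).length : Int) - (pvPos l).count 0 - (pvPos l).count 1 - (pvPos l).count 2)] := by
  induction l generalizing a b c d with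
  | nil => simp [pvPos]
  | cons row l ih =>
    simp only [List.foldl_cons]
    by_cases h1 : PySem.List.pyGetD row (-1) 0 = 1
    · have hpos : pvPos (row :: l) = PySem.List.pyGetD row 2 0 :: pvPos l := by
        simp [pvPos, h1]
      rw [if_pos h1]
      by_cases h0 : PySem.List.pyGetD row 2 0 = 0
      · rw [if_pos h0]
        show l.foldl _ [a + 1, b, c, d] = _
        rw [ih]; simp [hpos, h0, List.count_cons]; omega
      · rw [if_neg h0]
        by_cases h1' : PySem.List.pyGetD row 2 0 = 1
        · rw [if_pos h1']
          show l.foldl _ [a, b + 1, c, d] = _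
          rw [ih]; simp [hpos, h1', List.count_cons]; omega
        · rw [if_neg h1']
          by_cases h2 : PySem.List.pyGetD row 2 0 = 2
          · rw [if_pos h2]
            show l.foldl _ [a, b, c + 1, d] = _
            rw [ih]; simp [hpos, h2]; omega
          · rw [if_neg h2]
            show l.foldl _ [a, b, c, d + 1] = _
            rw [ih]; simp [hpos, h0, h1', h2]; omega
    · rw [if_neg h1]
      have hpos : pvPos (row :: l) = pvPos l := by simp [pvPos, h1]
      rw [ih, hpos]

-- ===== VERDICT (by name: the statement is the Claim_ definition above) =====
theorem chestpaincount_spec : Claim_equal_chestpaincount := by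
  intro dataset _ _
  unfold Spec_chestpaincount chestpaincount chestpaincount_alt
  rw [PySem.List.slice_from _ (by norm_num),
    PySem.List.foldl_pyRange_pyGetD' dataset []
      (fun count row =>
        if PySem.List.pyGetD row (-1) 0 = 1 then
          if PySem.List.pyGetD row 2 0 = 0 then pvIncAt count 0
          else if PySem.List.pyGetD row 2 0 = 1 then pvIncAt count 1
          else if PySem.List.pyGetD row 2 0 = 2 then pvIncAt count 2
          else pvIncAt count 3
        else count) [0, 0, 0, 0] (by norm_num)]
  rw [pv_fold_counts]
  simp [pvPos, PySem.List.count]
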